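-- pv_equiv track=rewrite | github.com/dongdonginflearn/p2p_exercise | utils.py | align_token_indices
-- ===== SOURCE A (Python) =====
-- def align_token_indices(tokens_of_source_prompt, tokens_of_target_prompt, max_len=77):
--     target_token_indices = []
--
--     max_index_of_source_prompt = 0
--     for target_token in tokens_of_target_prompt:
--         try:
--             token_index_of_source_prompt = tokens_of_source_prompt.index(target_token)
--             if token_index_of_source_prompt > max_index_of_source_prompt:
--                 max_index_of_source_prompt = token_index_of_source_prompt
--         except:
--             token_index_of_source_prompt = None
--         target_token_indices.append(token_index_of_source_prompt)
--
--     # padding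
--     while len(target_token_indices) < max_len:
--         max_index_of_source_prompt += 1
--         target_token_indices.append(max_index_of_source_prompt)
--
--     return target_token_indices
-- ===== SOURCE B (Python) =====
-- def align_token_indices(tokens_of_source_prompt, tokens_of_target_prompt, max_len=77):
--     # Inverted traversal: scan the SOURCE right-to-left, stamping each source index
--     # onto every matching target slot; leftward stamps overwrite, so each slot ends
--     # up with the FIRST occurrence.  Then one max reduction and closed-form padding.
--     res = [None] * len(tokens_of_target_prompt)
--     for i, s in reversed(list(enumerate(tokens_of_source_prompt))):
--         res = [i if t == s else r for t, r in zip(tokens_of_target_prompt, res)]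
--     m = 0
--     for r in res:
--         if r is not None and r > m:
--             m = r
--     return res + list(range(m + 1, m + 1 + max_len - len(res)))
-- ===== Notes on version B (the rewrite author's own statement) =====
-- stated objective: alternative
-- what changed: Inverts the loop structure: instead of scanning the source per target token with .index() and padding one-at-a-time in a while loop, B scans the source once right-to-left, stamping each index onto all matching target slots (overwrites leave first occurrences), then a separate max reduction and a closed-form range() padding.
import Mathlib
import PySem

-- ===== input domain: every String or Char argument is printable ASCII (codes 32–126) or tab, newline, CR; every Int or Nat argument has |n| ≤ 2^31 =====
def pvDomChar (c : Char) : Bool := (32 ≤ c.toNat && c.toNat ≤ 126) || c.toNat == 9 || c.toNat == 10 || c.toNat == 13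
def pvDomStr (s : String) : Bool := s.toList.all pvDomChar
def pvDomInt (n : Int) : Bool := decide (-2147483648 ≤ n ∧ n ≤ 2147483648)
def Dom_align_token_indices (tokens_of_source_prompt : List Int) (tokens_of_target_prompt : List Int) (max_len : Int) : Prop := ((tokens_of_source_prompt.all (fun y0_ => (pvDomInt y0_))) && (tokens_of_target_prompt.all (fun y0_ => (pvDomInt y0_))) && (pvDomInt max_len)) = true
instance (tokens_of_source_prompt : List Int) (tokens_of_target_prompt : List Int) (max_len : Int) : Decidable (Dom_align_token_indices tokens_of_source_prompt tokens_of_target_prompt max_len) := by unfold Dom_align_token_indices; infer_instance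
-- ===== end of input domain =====

-- B inverts the traversal: it scans the SOURCE right-to-left, stamping each source index
-- onto all matching target slots (leftward stamps overwrite, leaving first occurrences),
-- then does a separate max reduction and closed-form range padding (alternative).

-- ===== PORT A =====
-- the while-loop padding of A
def atiPad (mx : Int) (acc : List (Option Int)) (max_len : Int) : List (Option Int) :=
  if (acc.length : Int) < max_len then
    atiPad (mx + 1) (acc ++ [some (mx + 1)]) max_len
  else acc
termination_by (max_len - acc.length).toNat
decreasing_by simp; omega

def align_token_indices (tokens_of_source_prompt : List Int) (tokens_of_target_prompt : List Int) (max_len : Int) : List (Option Int) :=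
  let st := tokens_of_target_prompt.foldl
    (fun (st : List (Option Int) × Int) target_token =>
      match PySem.List.index? tokens_of_source_prompt target_token with
      | some k => (st.1 ++ [some (k : Int)], if (k : Int) > st.2 then (k : Int) else st.2)
      | none   => (st.1 ++ [none], st.2))
    ([], 0)
  atiPad st.2 st.1 max_len

-- ===== PORT B =====
-- res = [i if t == s else r for t, r in zip(tgt, res)]
def atiStamp (tgt : List Int) (res : List (Option Int)) (i : Int) (s : Int) : List (Option Int) :=
  (tgt.zip res).map (fun q => if q.1 = s then some i else q.2)

def align_token_indices_alt (tokens_of_source_prompt : List Int) (tokens_of_target_prompt : List Int) (max_len : Int) : List (Option Int) :=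
  -- res = [None] * len(tgt); for i, s in reversed(list(enumerate(src))): stamp
  let res := ((PySem.List.enumerate tokens_of_source_prompt 0).reverse).foldl
    (fun res p => atiStamp tokens_of_target_prompt res p.1 p.2)
    (List.replicate tokens_of_target_prompt.length none)
  -- m = 0; for r in res: if r is not None and r > m: m = r
  let m := res.foldl
    (fun m r => match r with
      | some i => if i > m then i else m
      | none   => m) 0
  -- res + list(range(m + 1, m + 1 + max_len - len(res)))
  res ++ (PySem.List.pyRange (m + 1) (m + 1 + max_len - (res.length : Int)) 1).map some

-- ===== PRECONDITION & SPEC =====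
def Spec_align_token_indices (tokens_of_source_prompt : List Int) (tokens_of_target_prompt : List Int) (max_len : Int) (out : List (Option Int)) : Prop := out = align_token_indices_alt tokens_of_source_prompt tokens_of_target_prompt max_len
instance (tokens_of_source_prompt : List Int) (tokens_of_target_prompt : List Int) (max_len : Int) (out : List (Option Int)) : Decidable (Spec_align_token_indices tokens_of_source_prompt tokens_of_target_prompt max_len out) := by unfold Spec_align_token_indices; infer_instance

-- ===== CLAIM (what is proved, stated in full; the proofs are below) =====
def Claim_equal_align_token_indices : Prop := ∀ (tokens_of_source_prompt : List Int) (tokens_of_target_prompt : List Int) (max_len : Int), Dom_align_token_indices tokens_of_source_prompt tokens_of_target_prompt max_len → Spec_align_token_indices tokens_of_source_prompt tokens_of_target_prompt max_len (align_token_indices tokens_of_source_prompt tokens_of_target_prompt max_len)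

-- ===== LEMMAS AND PROOFS =====

-- stamping a list that is pointwise a function of tgt stays pointwise a function of tgt
theorem atiStamp_map (tgt : List Int) (g : Int → Option Int) (i s : Int) :
    atiStamp tgt (tgt.map g) i s = tgt.map (fun t => if t = s then some i else g t) := by
  induction tgt with
  | nil => rfl
  | cons x xs ih => simpa [atiStamp] using ih

-- the right-to-left stamping scan computes the first-occurrence index of each target token
theorem ati_stamp_foldr (src tgt : List Int) (a : Int) (f : Int → Option Int) :
    (PySem.List.enumerate src a).foldr
      (fun p res => atiStamp tgt res p.1 p.2) (tgt.map f) =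
    tgt.map (fun t => match PySem.List.index? src t with
      | some k => some (a + (k : Int))
      | none   => f t) := by
  induction src generalizing a f with
  | nil =>
    rw [PySem.List.enumerate_nil, List.foldr_nil]
    refine List.map_congr_left (fun t _ => ?_)
    have : PySem.List.index? ([] : List Int) t = none := rfl
    rw [this]
  | cons x xs ih =>
    rw [PySem.List.enumerate_cons, List.foldr_cons, ih, atiStamp_map]
    refine List.map_congr_left (fun t _ => ?_)
    by_cases hxt : x = t
    · subst hxt
      rw [if_pos rfl, PySem.List.index?_cons_self]
      simp
    · rw [if_neg (fun h => hxt (Eq.symm h)), PySem.List.index?_cons_of_ne xs hxt]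
      cases h2 : PySem.List.index? xs t with
      | none => simp
      | some k => simp; ring

-- A's fused fold = map pass + max reduction
theorem ati_fuse (src tgt : List Int) (acc : List (Option Int)) (mx : Int) :
    tgt.foldl
      (fun (st : List (Option Int) × Int) target_token =>
        match PySem.List.index? src target_token with
        | some k => (st.1 ++ [some (k : Int)], if (k : Int) > st.2 then (k : Int) else st.2)
        | none   => (st.1 ++ [none], st.2))
      (acc, mx) =
    (acc ++ tgt.map (fun t => (PySem.List.index? src t).map (fun k => (k : Int))),
     (tgt.map (fun t => (PySem.List.index? src t).map (fun k => (k : Int)))).foldl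
       (fun m oi => match oi with
         | some i => if i > m then i else m
         | none   => m) mx) := by
  induction tgt generalizing acc mx with
  | nil => simp
  | cons t ts ih =>
    simp only [List.foldl_cons, List.map_cons]
    cases h : PySem.List.index? src t with
    | none =>
      rw [ih]
      simp
    | some k =>
      rw [ih]
      simp

-- the while-loop padding is a range in closed form
theorem atiPad_eq_range (mx : Int) (acc : List (Option Int)) (max_len : Int) :
    atiPad mx acc max_len =
      acc ++ (PySem.List.pyRange (mx + 1) (mx + 1 + max_len - (acc.length : Int)) 1).map some := by
  fun_induction atiPad mx acc max_len with
  | case1 mx acc h ih =>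
    rw [ih, PySem.List.pyRange_one_cons (a := mx + 1) (by omega)]
    have hb : mx + 1 + 1 + max_len - (((acc ++ [some (mx + 1)]).length : Int)) =
        mx + 1 + max_len - (acc.length : Int) := by
      simp only [List.length_append, List.length_cons, List.length_nil]
      push_cast
      ring
    rw [hb]
    simp
  | case2 mx acc h =>
    rw [PySem.List.pyRange_one_eq_nil (by omega)]
    simp

-- ===== VERDICT (by name: the statement is the Claim_ definition above) =====
theorem align_token_indices_spec : Claim_equal_align_token_indices := by
  intro src tgt max_len _
  unfold Spec_align_token_indices align_token_indices align_token_indices_alt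
  simp only [ati_fuse src tgt [] 0, List.nil_append, List.foldl_reverse]
  have hrep : (List.replicate tgt.length (none : Option Int)) = tgt.map (fun _ => none) := by
    simp
  rw [hrep]
  rw [show ((PySem.List.enumerate src 0).foldr
        (fun (p : Int × Int) (res : List (Option Int)) => atiStamp tgt res p.1 p.2)
        (tgt.map (fun _ => none))) =
      tgt.map (fun t => match PySem.List.index? src t with
        | some k => some ((0 : Int) + (k : Int))
        | none   => none) from ati_stamp_foldr src tgt 0 (fun _ => none)]
  have hmap : tgt.map (fun t => match PySem.List.index? src t with
        | some k => some ((0 : Int) + (k : Int))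
        | none   => (none : Option Int)) =
      tgt.map (fun t => (PySem.List.index? src t).map (fun k => (k : Int))) := by
    refine List.map_congr_left (fun t _ => ?_)
    cases h : PySem.List.index? src t with
    | none => simp
    | some k => simp
  rw [hmap, atiPad_eq_range]
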